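-- pv_equiv track=rewrite | github.com/PROSA-Project/prosa | scripts/comments.py | line_ranges
-- ===== SOURCE A (Python) =====
-- from collections.abc import Iterable, Iterator
--
-- def line_ranges(src) -> Iterator[tuple[int, int]]:
--     "Yield a list of offset pairs indicating all lines in the input"
--     last = 0
--     _line_ranges = []
--     for i, c in enumerate(src):
--         if c == "\n":
--             yield (last, i + 1)
--             last = i + 1
--     if last < len(src):
--         yield (last, len(src))
-- ===== SOURCE B (Python) =====
-- def line_ranges(src):
--     "Yield a list of offset pairs indicating all lines in the input"
--     pos = 0
--     while True:
--         idx = src.find("\n", pos)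
--         if idx == -1:
--             break
--         yield (pos, idx + 1)
--         pos = idx + 1
--     if pos < len(src):
--         yield (pos, len(src))
-- ===== Notes on version B (the rewrite author's own statement) =====
-- stated objective: idiomatic
-- what changed: A's per-character enumerate scan testing every char against '\n' is replaced by a loop that jumps directly between successive str.find('\n', pos) hits, emitting one range per hit.
import Mathlib
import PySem

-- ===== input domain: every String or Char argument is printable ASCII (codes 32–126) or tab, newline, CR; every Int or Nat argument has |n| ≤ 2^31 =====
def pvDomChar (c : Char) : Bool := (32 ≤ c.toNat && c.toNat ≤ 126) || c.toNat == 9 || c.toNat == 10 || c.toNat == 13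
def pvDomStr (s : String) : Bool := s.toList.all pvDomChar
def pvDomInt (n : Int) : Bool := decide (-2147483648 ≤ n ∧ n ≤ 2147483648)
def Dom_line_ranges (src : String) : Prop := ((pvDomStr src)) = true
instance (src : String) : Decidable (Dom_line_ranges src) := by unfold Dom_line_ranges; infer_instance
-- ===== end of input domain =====

-- B replaces A's per-character enumerate scan with a loop that jumps between
-- successive str.find('\n', pos) hits; return value only (both are generators, compared as lists).

-- ===== PORT A =====
-- per-character loop over enumerate(src): state (last, ranges yielded so far)
def line_ranges (src : String) : List (Int × Int) :=
  let cs := src.toList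
  let st := (PySem.List.enumerate cs 0).foldl
    (fun (st : Int × List (Int × Int)) ic =>
      if ic.2 = '\n' then (ic.1 + 1, st.2 ++ [(st.1, ic.1 + 1)]) else st)
    (0, [])
  if st.1 < (PySem.Chars.len cs : Int) then st.2 ++ [(st.1, (PySem.Chars.len cs : Int))] else st.2

-- ===== PORT B =====
-- termination fact for the while-loop: find('\n', pos) with pos past the end is -1
theorem findFrom_nl_of_big (cs : List Char) (pos : Nat) (h : cs.length < pos) :
    PySem.Chars.findFrom cs ['\n'] (pos : Int) none = -1 := by
  have h2 : (cs.length : Int) < (pos : Int) := by exact_mod_cast h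
  simp [PySem.Chars.findFrom, h2, Int.not_lt.mpr (Int.natCast_nonneg pos)]

-- the while-loop of Source B: idx = src.find('\n', pos); stop on -1, else yield and jump to idx+1
def line_ranges_alt_go (cs : List Char) (pos : Nat) : List (Int × Int) :=
  let idx := PySem.Chars.findFrom cs ['\n'] (pos : Int) none
  if _h : idx = -1 then
    if (pos : Int) < (PySem.Chars.len cs : Int) then [((pos : Int), (PySem.Chars.len cs : Int))] else []
  else
    ((pos : Int), idx + 1) :: line_ranges_alt_go cs (idx.toNat + 1)
termination_by cs.length + 1 - pos
decreasing_by
  by_cases hle : pos ≤ cs.length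
  · obtain ⟨h1, h2, -⟩ := PySem.Chars.findFrom_natCast_spec cs ['\n'] pos hle _h
    have hne : cs.drop (PySem.Chars.findFrom cs ['\n'] (pos : Int) none).toNat ≠ [] := by
      intro he
      rw [he] at h2
      simp at h2
    have hlt : (PySem.Chars.findFrom cs ['\n'] (pos : Int) none).toNat < cs.length := by
      by_contra hge
      exact hne (List.drop_eq_nil_of_le (by omega))
    omega
  · exact absurd (findFrom_nl_of_big cs pos (by omega)) _h

def line_ranges_alt (src : String) : List (Int × Int) :=
  line_ranges_alt_go src.toList 0

-- ===== PRECONDITION & SPEC =====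
def Spec_line_ranges (src : String) (out : List (Int × Int)) : Prop := out = line_ranges_alt src
instance (src : String) (out : List (Int × Int)) : Decidable (Spec_line_ranges src out) := by unfold Spec_line_ranges; infer_instance

-- ===== CLAIM (what is proved, stated in full; the proofs are below) =====
def Claim_equal_line_ranges : Prop := ∀ (src : String), Dom_line_ranges src → Spec_line_ranges src (line_ranges src)

-- ===== LEMMAS AND PROOFS =====

-- reference structural recursion: ranges emitted scanning from absolute index i with open-line start `last`
def lr_f : List Char → Int → Int → List (Int × Int)
  | [], i, last => if last < i then [(last, i)] else []
  | c :: cs, i, last => if c = '\n' then (last, i + 1) :: lr_f cs (i + 1) (i + 1) else lr_f cs (i + 1) last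

theorem lr_a_eq_f (cs : List Char) (s last : Int) (acc : List (Int × Int)) :
    (let st := (PySem.List.enumerate cs s).foldl
      (fun (st : Int × List (Int × Int)) ic =>
        if ic.2 = '\n' then (ic.1 + 1, st.2 ++ [(st.1, ic.1 + 1)]) else st)
      (last, acc)
     if st.1 < s + (cs.length : Int) then st.2 ++ [(st.1, s + (cs.length : Int))] else st.2)
    = acc ++ lr_f cs s last := by
  induction cs generalizing s last acc with
  | nil =>
      simp only [PySem.List.enumerate_nil, List.foldl_nil, List.length_nil, Nat.cast_zero,
        add_zero, lr_f]
      split_ifs <;> simp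
  | cons c cs ih =>
      simp only [PySem.List.enumerate_cons, List.foldl_cons, lr_f, List.length_cons]
      by_cases hc : c = '\n'
      · simp only [hc, reduceIte]
        have := ih (s + 1) (s + 1) (acc ++ [(last, s + 1)])
        push_cast at this ⊢
        rw [show s + ((cs.length : Int) + 1) = (s + 1) + (cs.length : Int) by ring, this]
        simp
      · simp only [if_neg hc]
        have := ih (s + 1) last acc
        push_cast at this ⊢
        rw [show s + ((cs.length : Int) + 1) = (s + 1) + (cs.length : Int) by ring, this]

theorem lr_f_no_nl (u : List Char) (rest : List Char) (i last : Int) (h : '\n' ∉ u) :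
    lr_f (u ++ rest) i last = lr_f rest (i + u.length) last := by
  induction u generalizing i with
  | nil => simp only [List.nil_append, List.length_nil, Nat.cast_zero, add_zero]
  | cons c u ih =>
      have hc : c ≠ '\n' := fun hc => h (by simp [hc])
      simp only [List.cons_append, lr_f, if_neg hc]
      rw [ih (i + 1) (fun hm => h (List.mem_cons_of_mem _ hm))]
      congr 1
      simp only [List.length_cons]
      push_cast
      ring

theorem singleton_nl_prefix_drop (cs : List Char) (j : Nat) (hj : j < cs.length)
    (hc : cs[j] = '\n') : ['\n'] <+: cs.drop j := by
  rw [List.drop_eq_getElem_cons hj, hc]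
  exact ⟨cs.drop (j + 1), by simp⟩

theorem lr_b_eq_f : ∀ (n : ℕ) (cs : List Char) (pos : Nat), pos ≤ cs.length →
    cs.length - pos = n →
    line_ranges_alt_go cs pos = lr_f (cs.drop pos) (pos : Int) (pos : Int) := by
  intro n
  induction n using Nat.strong_induction_on with
  | _ n ih =>
    intro cs pos hle hn
    rw [line_ranges_alt_go]
    by_cases hidx : PySem.Chars.findFrom cs ['\n'] (pos : Int) none = -1
    · rw [dif_pos hidx]
      have hnl : ¬ ['\n'] <:+: cs.drop pos :=
        (PySem.Chars.findFrom_natCast_eq_neg_one_iff cs ['\n'] pos hle).mp hidx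
      have hmem : '\n' ∉ cs.drop pos := fun hm =>
        hnl ((List.singleton_infix_iff _ _).mpr hm)
      have := lr_f_no_nl (cs.drop pos) [] (pos : Int) (pos : Int) hmem
      rw [List.append_nil] at this
      rw [this]
      simp only [lr_f, List.length_drop, PySem.Chars.len_eq]
      have : ((pos : Int)) + ((cs.length - pos : Nat) : Int) = (cs.length : Int) := by omega
      rw [this]
    · rw [dif_neg hidx]
      obtain ⟨h1, h2, h3⟩ := PySem.Chars.findFrom_natCast_spec cs ['\n'] pos hle hidx
      set idx := PySem.Chars.findFrom cs ['\n'] (pos : Int) none with hidxdef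
      have hidx0 : 0 ≤ idx := le_trans (by exact_mod_cast Int.natCast_nonneg pos) h1
      set t := idx.toNat with ht
      have hti : (t : Int) = idx := Int.toNat_of_nonneg hidx0
      have hpt : pos ≤ t := by omega
      obtain ⟨w, hw⟩ := h2
      have htlt : t < cs.length := by
        by_contra hge
        rw [List.drop_eq_nil_of_le (by omega)] at hw
        simp at hw
      have hw' : cs.drop t = '\n' :: w := by rw [← hw]; simp
      have hwd : cs.drop (t + 1) = w := by
        have h1d := congrArg (List.drop 1) hw'
        rw [List.drop_drop] at h1d
        simpa [Nat.add_comm] using h1d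
      have hdropt : cs.drop t = '\n' :: cs.drop (t + 1) := by rw [hwd, hw']
      -- split the suffix at the found newline
      have hsplit : cs.drop pos = (cs.drop pos).take (t - pos) ++ '\n' :: cs.drop (t + 1) := by
        conv_lhs => rw [← List.take_append_drop (t - pos) (cs.drop pos)]
        rw [List.drop_drop, show pos + (t - pos) = t by omega, hdropt]
      have hnomem : '\n' ∉ (cs.drop pos).take (t - pos) := by
        intro hm
        obtain ⟨j, hj, hc⟩ := List.getElem_of_mem hm
        have hjlen : j < t - pos := lt_of_lt_of_le hj (by simp)
        have hc' : cs[pos + j]'(by omega) = '\n' := by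
          rw [List.getElem_take, List.getElem_drop] at hc
          exact hc
        exact h3 (pos + j) (by exact_mod_cast Int.ofNat_le.mpr (Nat.le_add_right pos j))
          (by omega) (singleton_nl_prefix_drop cs (pos + j) (by omega) hc')
      have hlen : ((cs.drop pos).take (t - pos)).length = t - pos := by
        simp [List.length_take, List.length_drop]
        omega
      rw [hsplit, lr_f_no_nl _ _ _ _ hnomem, hlen]
      have harith : (pos : Int) + ((t - pos : Nat) : Int) = (t : Int) := by omega
      rw [harith]
      simp only [lr_f, reduceIte]
      rw [ih (cs.length - (t + 1)) (by omega) cs (t + 1) (by omega) rfl]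
      rw [hti]
      push_cast
      rw [hti]

-- ===== VERDICT (by name: the statement is the Claim_ definition above) =====
theorem line_ranges_spec : Claim_equal_line_ranges := by
  intro src _
  unfold Spec_line_ranges line_ranges line_ranges_alt
  have ha := lr_a_eq_f src.toList 0 0 []
  simp only [zero_add, List.nil_append] at ha
  simp only [PySem.Chars.len_eq]
  rw [ha]
  rw [lr_b_eq_f src.toList.length src.toList 0 (Nat.zero_le _) (by omega)]
  simp
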